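-- pv_equiv track=rewrite | github.com/kninad/prob-emb | ipy-notebooks/book_create_genres.py | create_count_matrix
-- ===== SOURCE A (Python) =====
-- import itertools
--
-- def create_count_matrix(final_dict):
--     # helper function
--     def findnum_common_elements(list1, list2):
--         return len(set(list1).intersection(list2))
--
--     count_matrix = {}
--     for pair in itertools.combinations(final_dict.keys(), r=2):
--         book1, book2 = pair
--         count_matrix[pair] = findnum_common_elements(final_dict[book1], final_dict[book2])
--
--     # adding the marginal counts
--     for k in final_dict.keys():
--         pair = (k,k)
--         count_matrix[pair] = len(final_dict[k])
--
--     return count_matrix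
-- ===== SOURCE B (Python) =====
-- import itertools
--
-- def create_count_matrix(final_dict):
--     keys = list(final_dict.keys())
--     # inverted index: element -> list of books containing it (in key order)
--     inv = {}
--     for book, elems in final_dict.items():
--         for e in set(elems):
--             inv.setdefault(e, []).append(book)
--     # co-occurring pair counts, accumulated per element (output-sensitive)
--     pair_counts = {}
--     for books in inv.values():
--         for p in itertools.combinations(books, 2):
--             pair_counts[p] = pair_counts.get(p, 0) + 1
--     count_matrix = {}
--     for pair in itertools.combinations(keys, 2):
--         count_matrix[pair] = pair_counts.get(pair, 0)
--     for k in keys: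
--         count_matrix[(k, k)] = len(final_dict[k])
--     return count_matrix
-- ===== Notes on version B (the rewrite author's own statement) =====
-- stated objective: faster
-- what changed: B replaces A's per-pair set intersections with an inverted index (element -> books containing it) and an accumulated co-occurrence counter, so each pair's count becomes a dictionary lookup instead of an O(L) intersection.
import Mathlib
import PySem

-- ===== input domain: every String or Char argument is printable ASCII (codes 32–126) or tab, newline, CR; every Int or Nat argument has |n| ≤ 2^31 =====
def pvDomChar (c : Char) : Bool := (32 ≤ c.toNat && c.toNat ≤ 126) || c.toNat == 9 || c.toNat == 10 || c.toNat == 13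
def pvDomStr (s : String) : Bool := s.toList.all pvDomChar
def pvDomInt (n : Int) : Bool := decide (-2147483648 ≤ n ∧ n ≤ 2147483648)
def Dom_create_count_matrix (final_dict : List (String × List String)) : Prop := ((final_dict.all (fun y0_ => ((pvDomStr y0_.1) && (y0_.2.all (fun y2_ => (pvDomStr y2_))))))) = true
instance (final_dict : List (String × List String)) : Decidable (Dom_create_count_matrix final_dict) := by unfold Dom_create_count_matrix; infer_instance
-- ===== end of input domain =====

-- B replaces A's per-pair set intersections with an inverted index (element → books)
-- plus an accumulated co-occurrence counter (objective: faster).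

-- ===== PORT A =====
-- 'book1, book2 = pair' for a 2-element combination
def pvUnpack2 (pr : List String) : String × String :=
  match pr with
  | b1 :: b2 :: _ => (b1, b2)
  | _ => ("", "")

-- len(set(list1).intersection(list2))
def pvFindnumCommon (list1 list2 : List String) : Int :=
  ((PySem.Set.inter (PySem.Set.ofList list1) list2).length : Int)

def create_count_matrix (final_dict : List (String × List String)) : List (String × String × Int) :=
  let d := PySem.Dict.ofList final_dict
  let cm : PySem.Dict (String × String) Int :=
    (PySem.List.combinations d.keys 2).foldl
      (fun cm pr => cm.insert (pvUnpack2 pr)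
        (pvFindnumCommon (d.getD (pvUnpack2 pr).1 []) (d.getD (pvUnpack2 pr).2 [])))
      PySem.Dict.empty
  let cm2 := d.keys.foldl (fun cm k => cm.insert (k, k) ((d.getD k []).length : Int)) cm
  cm2.items.map (fun p => (p.1.1, p.1.2, p.2))

-- ===== PORT B =====
def create_count_matrix_alt (final_dict : List (String × List String)) : List (String × String × Int) :=
  let d := PySem.Dict.ofList final_dict
  let keys := d.keys
  -- inverted index: element -> books containing it (in key order)
  let inv : PySem.Dict String (List String) :=
    d.items.foldl (fun inv p =>
      (PySem.Set.ofList p.2).foldl (fun inv e => inv.modify e [] (fun bs => bs ++ [p.1])) inv)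
      PySem.Dict.empty
  -- co-occurring pair counts, accumulated per element
  let pc : PySem.Dict (String × String) Int :=
    inv.values.foldl (fun pc books =>
      (PySem.List.combinations books 2).foldl
        (fun pc c => pc.insert (pvUnpack2 c) (pc.getD (pvUnpack2 c) 0 + 1)) pc)
      PySem.Dict.empty
  let cm : PySem.Dict (String × String) Int :=
    (PySem.List.combinations keys 2).foldl
      (fun cm pr => cm.insert (pvUnpack2 pr) (pc.getD (pvUnpack2 pr) 0))
      PySem.Dict.empty
  let cm2 := keys.foldl (fun cm k => cm.insert (k, k) ((d.getD k []).length : Int)) cm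
  cm2.items.map (fun p => (p.1.1, p.1.2, p.2))

-- ===== PRECONDITION & SPEC =====
def Spec_create_count_matrix (final_dict : List (String × List String)) (out : List (String × String × Int)) : Prop := out = create_count_matrix_alt final_dict
instance (final_dict : List (String × List String)) (out : List (String × String × Int)) : Decidable (Spec_create_count_matrix final_dict out) := by unfold Spec_create_count_matrix; infer_instance

-- ===== CLAIM (what is proved, stated in full; the proofs are below) =====
def Claim_equal_create_count_matrix : Prop := ∀ (final_dict : List (String × List String)), Dom_create_count_matrix final_dict → Spec_create_count_matrix final_dict (create_count_matrix final_dict)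

-- ===== LEMMAS AND PROOFS =====

-- list(itertools.combinations(l, 2)) unpacked to pairs
def pvPairsOf (l : List String) : List (String × String) :=
  (PySem.List.combinations l 2).map pvUnpack2

-- 'a occurs strictly before b in l' (adequate on Nodup lists)
def pvOB : List String → String → String → Bool
  | [], _, _ => false
  | x :: t, a, b => if x = a then t.contains b else pvOB t a b

-- books whose element list contains e, in order
def pvBooksOf (items : List (String × List String)) (e : String) : List String :=
  (items.filter (fun p => p.2.contains e)).map (fun p => p.1)

-- element/book incidence pairs, per book deduplicated
def pvEB (items : List (String × List String)) : List (String × String) :=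
  items.flatMap (fun p => (PySem.Set.ofList p.2).map (fun e => (e, p.1)))

theorem pvPairsOf_cons (x : String) (t : List String) :
    pvPairsOf (x :: t) = t.map (fun y => (x, y)) ++ pvPairsOf t := by
  simp [pvPairsOf, PySem.List.combinations_cons_succ, PySem.List.combinations_one,
    List.map_map, Function.comp, pvUnpack2]

theorem pvOB_mem {l : List String} {a b : String} (h : pvOB l a b = true) : a ∈ l ∧ b ∈ l := by
  induction l with
  | nil => simp [pvOB] at h
  | cons x t ih =>
    by_cases hx : x = a
    · subst hx
      simp [pvOB] at h
      exact ⟨List.mem_cons_self, List.mem_cons_of_mem _ (by simpa using h)⟩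
    · simp [pvOB, hx] at h
      rcases ih h with ⟨ha, hb⟩
      exact ⟨List.mem_cons_of_mem _ ha, List.mem_cons_of_mem _ hb⟩

theorem pvPairsOf_fst_mem {l : List String} {a b : String} (h : (a, b) ∈ pvPairsOf l) : a ∈ l := by
  induction l with
  | nil => simp [pvPairsOf, PySem.List.combinations_nil_succ] at h
  | cons x t ih =>
    rw [pvPairsOf_cons] at h
    rcases List.mem_append.1 h with h | h
    · rcases List.mem_map.1 h with ⟨y, _, hy⟩
      simp at hy
      exact hy.1 ▸ List.mem_cons_self
    · exact List.mem_cons_of_mem _ (ih h)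

theorem pvCount_map_pair (x a b : String) (t : List String) :
    (t.map (fun y => (x, y))).count (a, b) = if x = a then t.count b else 0 := by
  induction t with
  | nil => simp
  | cons y t ih =>
    simp only [List.map_cons, List.count_cons, ih]
    by_cases hx : x = a <;> by_cases hy : y = b <;>
      simp [hx, hy, Prod.ext_iff]

theorem pvCount_pairsOf {l : List String} (h : l.Nodup) (a b : String) :
    (pvPairsOf l).count (a, b) = if pvOB l a b then 1 else 0 := by
  induction l with
  | nil => simp [pvPairsOf, PySem.List.combinations_nil_succ, pvOB]
  | cons x t ih =>
    have hx : x ∉ t := (List.nodup_cons.1 h).1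
    have ht : t.Nodup := (List.nodup_cons.1 h).2
    rw [pvPairsOf_cons, List.count_append, pvCount_map_pair]
    by_cases hxa : x = a
    · subst hxa
      have h0 : (pvPairsOf t).count (x, b) = 0 :=
        List.count_eq_zero.2 (fun hmem => hx (pvPairsOf_fst_mem hmem))
      by_cases hb : b ∈ t
      · simp [pvOB, h0, List.count_eq_one_of_mem ht hb, hb]
      · simp [pvOB, h0, List.count_eq_zero.2 hb, hb]
    · simp [pvOB, hxa, ih ht]

theorem pvMem_pairsOf_iff {l : List String} (h : l.Nodup) (a b : String) :
    (a, b) ∈ pvPairsOf l ↔ pvOB l a b = true := by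
  rw [← List.count_pos_iff, pvCount_pairsOf h]
  by_cases hob : pvOB l a b <;> simp [hob]

theorem pvNodup_pairsOf {l : List String} (h : l.Nodup) : (pvPairsOf l).Nodup := by
  rw [List.nodup_iff_count_le_one]
  rintro ⟨a, b⟩
  rw [pvCount_pairsOf h]
  split <;> omega

theorem pvOB_irrefl {l : List String} (h : l.Nodup) (a : String) : pvOB l a a = false := by
  induction l with
  | nil => rfl
  | cons x t ih =>
    have hx : x ∉ t := (List.nodup_cons.1 h).1
    by_cases hxa : x = a
    · subst hxa; simp [pvOB, hx]
    · simp [pvOB, hxa, ih (List.nodup_cons.1 h).2]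

theorem pvOB_sublist {bs l : List String} {a b : String} (hs : bs.Sublist l) (h : l.Nodup)
    (hab : pvOB l a b = true) (ha : a ∈ bs) (hb : b ∈ bs) : pvOB bs a b = true := by
  induction hs with
  | slnil => cases ha
  | cons x hs ih =>
    rename_i bs' t
    have hx : x ∉ t := (List.nodup_cons.1 h).1
    have ht : t.Nodup := (List.nodup_cons.1 h).2
    by_cases hxa : x = a
    · exact absurd (hs.subset ha) (hxa ▸ hx)
    · simp only [pvOB, hxa] at hab
      exact ih ht hab ha hb
  | cons₂ x hs ih =>
    rename_i bs' t
    have hx : x ∉ t := (List.nodup_cons.1 h).1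
    have ht : t.Nodup := (List.nodup_cons.1 h).2
    by_cases hxa : x = a
    · subst hxa
      simp only [pvOB] at hab ⊢
      have hbt : b ∈ t := by simpa using hab
      have hbx : b ≠ x := fun hbx => hx (hbx ▸ hbt)
      have : b ∈ bs' := by
        rcases List.mem_cons.1 hb with h' | h'
        · exact absurd h' hbx
        · exact h'
      simpa using this
    · simp only [pvOB, if_neg hxa] at hab ⊢
      have hbx : b ≠ x := by
        intro hbx
        exact hx (hbx ▸ (pvOB_mem hab).2)
      have ha' : a ∈ bs' := by
        rcases List.mem_cons.1 ha with h' | h'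
        · exact absurd h'.symm hxa
        · exact h'
      have hb' : b ∈ bs' := by
        rcases List.mem_cons.1 hb with h' | h'
        · exact absurd h' hbx
        · exact h'
      exact ih ht hab ha' hb'

theorem pvCount_pairsOf_sublist {bs l : List String} {a b : String} (hs : bs.Sublist l)
    (h : l.Nodup) (hab : pvOB l a b = true) :
    (pvPairsOf bs).count (a, b) = if a ∈ bs ∧ b ∈ bs then 1 else 0 := by
  have hnb : bs.Nodup := hs.nodup h
  rw [pvCount_pairsOf hnb]
  by_cases hm : a ∈ bs ∧ b ∈ bs
  · rw [if_pos (pvOB_sublist hs h hab hm.1 hm.2), if_pos hm]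
  · rw [if_neg hm, if_neg]
    intro hob
    exact hm (pvOB_mem hob)

-- a Nat version of 'a 0/1-sum is countP'
theorem pvSum_map_ite (l : List String) (p : String → Bool) :
    (l.map (fun x => if p x then (1 : Nat) else 0)).sum = l.countP p := by
  induction l with
  | nil => rfl
  | cons x t ih => by_cases hp : p x <;> simp [hp, ih] <;> omega

theorem pvCount_flatMap {α β : Type} [BEq β] (l : List α) (g : α → List β) (q : β) :
    (l.flatMap g).count q = (l.map (fun x => (g x).count q)).sum := by
  induction l with
  | nil => rfl
  | cons x t ih => simp [List.flatMap_cons, List.count_append, ih]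

-- the inverted-index fold flattened over incidence pairs
theorem pvInv_eq_flat (items : List (String × List String)) :
    items.foldl (fun inv p =>
        (PySem.Set.ofList p.2).foldl (fun inv e => inv.modify e [] (fun bs => bs ++ [p.1])) inv)
      PySem.Dict.empty
      = (pvEB items).foldl (fun inv q => inv.modify q.1 [] (fun bs => bs ++ [q.2]))
          PySem.Dict.empty := by
  rw [pvEB, List.foldl_flatMap]
  refine PySem.List.foldl_congr_mem _ _ _ _ ?_
  intro acc p _
  rw [List.foldl_map]

theorem pvEB_filter_map (items : List (String × List String)) (e : String) :
    ((pvEB items).filter (fun q => q.1 == e)).map (fun q => q.2) = pvBooksOf items e := by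
  induction items with
  | nil => rfl
  | cons p items ih =>
    have hset : ((PySem.Set.ofList p.2).map (fun e' => (e', p.1))).filter (fun q => q.1 == e)
        = ((PySem.Set.ofList p.2).filter (fun e' => e' == e)).map (fun e' => (e', p.1)) := by
      rw [List.filter_map]; rfl
    have hfil : (PySem.Set.ofList p.2).filter (fun e' => e' == e)
        = if p.2.contains e then [e] else [] := by
      rw [List.filter_beq]
      by_cases he : e ∈ p.2
      · rw [if_pos (List.contains_iff_mem.2 he),
          List.count_eq_one_of_mem (PySem.Set.nodup_ofList p.2) ((PySem.Set.mem_ofList p.2 e).2 he)]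
        rfl
      · rw [if_neg (fun hc => he (List.contains_iff_mem.1 hc)),
          List.count_eq_zero.2 (fun hc => he ((PySem.Set.mem_ofList p.2 e).1 hc))]
        rfl
    simp only [pvEB, List.flatMap_cons, List.filter_append, List.map_append, hset, hfil]
    rw [← pvEB] at *
    by_cases hc : p.2.contains e
    · simp only [if_pos hc, ih, pvBooksOf, List.filter_cons, hc]
      rfl
    · simp only [if_neg hc, ih, pvBooksOf, List.filter_cons, hc]
      rfl

theorem pvMem_booksOf (items : List (String × List String)) (e b' : String) :
    b' ∈ pvBooksOf items e ↔ ∃ p ∈ items, p.1 = b' ∧ e ∈ p.2 := by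
  simp [pvBooksOf, List.mem_filter]

theorem pvBooksOf_sublist (items : List (String × List String)) (e : String) :
    (pvBooksOf items e).Sublist (items.map (fun p => p.1)) :=
  List.Sublist.map _ List.filter_sublist


-- the inverted index of port B, as a function of the input dict (definitionally the port's fold)
def pvInvOf (d : PySem.Dict String (List String)) : PySem.Dict String (List String) :=
  d.items.foldl (fun inv p =>
    (PySem.Set.ofList p.2).foldl (fun inv e => inv.modify e [] (fun bs => bs ++ [p.1])) inv)
    PySem.Dict.empty

-- the co-occurrence counter of port B (definitionally the port's fold)
def pvPcOf (inv : PySem.Dict String (List String)) : PySem.Dict (String × String) Int :=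
  inv.values.foldl (fun pc books =>
    (PySem.List.combinations books 2).foldl
      (fun pc c => pc.insert (pvUnpack2 c) (pc.getD (pvUnpack2 c) 0 + 1)) pc)
    PySem.Dict.empty

theorem pvInv_getD (d : PySem.Dict String (List String)) (e : String) :
    (pvInvOf d).getD e [] = pvBooksOf d.items e := by
  rw [pvInvOf, pvInv_eq_flat, PySem.Dict.getD_foldl_modify_append, ← pvEB_filter_map]
  simp

theorem pvInv_keys (d : PySem.Dict String (List String)) :
    (pvInvOf d).keys = PySem.Set.ofList ((pvEB d.items).map (fun q => q.1)) := by
  rw [pvInvOf, pvInv_eq_flat, PySem.Dict.keys_foldl_modify_key]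
  simp [PySem.Set.update, PySem.Set.ofList_eq_foldl]

theorem pvInv_nodup (d : PySem.Dict String (List String)) : (pvInvOf d).keys.Nodup := by
  rw [pvInv_keys]; exact PySem.Set.nodup_ofList _

theorem pvMem_inv_keys (d : PySem.Dict String (List String)) (e : String) :
    e ∈ (pvInvOf d).keys ↔ ∃ p ∈ d.items, e ∈ p.2 := by
  rw [pvInv_keys]
  simp [PySem.Set.mem_ofList, pvEB]

theorem pvInv_values (d : PySem.Dict String (List String)) :
    (pvInvOf d).values = (pvInvOf d).keys.map (fun e => pvBooksOf d.items e) := by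
  rw [PySem.Dict.values_eq_map_keys _ (pvInv_nodup d) []]
  exact List.map_congr_left (fun e _ => pvInv_getD d e)

theorem pvPc_getD (vs : List (List String)) (q : String × String) :
    (vs.foldl (fun pc books =>
        (PySem.List.combinations books 2).foldl
          (fun pc c => pc.insert (pvUnpack2 c) (pc.getD (pvUnpack2 c) 0 + 1)) pc)
      PySem.Dict.empty).getD q 0
      = ((vs.flatMap pvPairsOf).count q : Int) := by
  have h1 : vs.foldl (fun pc books =>
        (PySem.List.combinations books 2).foldl
          (fun pc c => pc.insert (pvUnpack2 c) (pc.getD (pvUnpack2 c) 0 + 1)) pc)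
      (PySem.Dict.empty : PySem.Dict (String × String) Int)
      = (vs.flatMap pvPairsOf).foldl (fun pc q => pc.insert q (pc.getD q 0 + 1))
          (PySem.Dict.empty : PySem.Dict (String × String) Int) := by
    rw [List.foldl_flatMap]
    refine PySem.List.foldl_congr_mem _ _ _ _ ?_
    intro acc books _
    rw [pvPairsOf, List.foldl_map]
  refine Eq.trans (congrArg (fun dct : PySem.Dict (String × String) Int => dct.getD q 0) h1) ?_
  beta_reduce
  rw [PySem.Dict.getD_foldl_insert_add_one]
  simp

theorem pvValue_eq (d : PySem.Dict String (List String)) (hk : d.keys.Nodup)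
    (q : String × String) (hq : q ∈ pvPairsOf d.keys) :
    (pvPcOf (pvInvOf d)).getD q 0 = pvFindnumCommon (d.getD q.1 []) (d.getD q.2 []) := by
  obtain ⟨a, b⟩ := q
  have hab : pvOB d.keys a b = true := (pvMem_pairsOf_iff hk a b).1 hq
  have ha : a ∈ d.keys := (pvOB_mem hab).1
  have hb : b ∈ d.keys := (pvOB_mem hab).2
  obtain ⟨pa, hpa, hpa1⟩ := List.mem_map.1 ha
  obtain ⟨pb, hpb, hpb1⟩ := List.mem_map.1 hb
  have hpa' : (a, pa.2) ∈ d.items := by rw [← hpa1]; exact hpa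
  have hpb' : (b, pb.2) ∈ d.items := by rw [← hpb1]; exact hpb
  have hla : d.getD a [] = pa.2 := PySem.Dict.getD_of_mem_items _ hpa' hk []
  have hlb : d.getD b [] = pb.2 := PySem.Dict.getD_of_mem_items _ hpb' hk []
  have hA : ∀ e, a ∈ pvBooksOf d.items e ↔ e ∈ d.getD a [] := by
    intro e
    rw [pvMem_booksOf]
    constructor
    · rintro ⟨p', hp', h1, he⟩
      have : (a, p'.2) ∈ d.items := by rw [← h1]; exact hp'
      rw [PySem.Dict.getD_of_mem_items _ this hk []]
      exact he
    · intro he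
      exact ⟨pa, hpa, hpa1, by rw [← hla]; exact he⟩
  have hB : ∀ e, b ∈ pvBooksOf d.items e ↔ e ∈ d.getD b [] := by
    intro e
    rw [pvMem_booksOf]
    constructor
    · rintro ⟨p', hp', h1, he⟩
      have : (b, p'.2) ∈ d.items := by rw [← h1]; exact hp'
      rw [PySem.Dict.getD_of_mem_items _ this hk []]
      exact he
    · intro he
      exact ⟨pb, hpb, hpb1, by rw [← hlb]; exact he⟩
  have hEK : ∀ e, e ∈ d.getD a [] → e ∈ (pvInvOf d).keys := by
    intro e he
    exact (pvMem_inv_keys d e).2 ⟨pa, hpa, by rw [← hla]; exact he⟩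
  -- left side: the counter value is the number of elements co-occurring in both books
  have hp : ∀ e ∈ (pvInvOf d).keys,
      (pvPairsOf (pvBooksOf d.items e)).count (a, b)
        = if ((d.getD a []).contains e && (d.getD b []).contains e) then 1 else 0 := by
    intro e _
    rw [pvCount_pairsOf_sublist (pvBooksOf_sublist d.items e) hk hab]
    by_cases hc : a ∈ pvBooksOf d.items e ∧ b ∈ pvBooksOf d.items e
    · rw [if_pos hc, if_pos]
      rw [Bool.and_eq_true, List.contains_iff_mem, List.contains_iff_mem]
      exact ⟨(hA e).1 hc.1, (hB e).1 hc.2⟩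
    · rw [if_neg hc, if_neg]
      intro hcc
      rw [Bool.and_eq_true, List.contains_iff_mem, List.contains_iff_mem] at hcc
      exact hc ⟨(hA e).2 hcc.1, (hB e).2 hcc.2⟩
  have hL : (pvPcOf (pvInvOf d)).getD (a, b) 0
      = ((((pvInvOf d).keys.filter
            (fun e => (d.getD a []).contains e && (d.getD b []).contains e)).length : Nat) : Int) := by
    rw [pvPcOf, pvPc_getD, pvInv_values, pvCount_flatMap, List.map_map]
    congr 1
    have : ((pvInvOf d).keys.map
        ((fun bs => (pvPairsOf bs).count (a, b)) ∘ (fun e => pvBooksOf d.items e)))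
        = (pvInvOf d).keys.map
            (fun e => if ((d.getD a []).contains e && (d.getD b []).contains e) then 1 else 0) :=
      List.map_congr_left (fun e he => hp e he)
    rw [this, pvSum_map_ite, List.countP_eq_length_filter]
  -- right side: the intersection size
  have hperm : ((pvInvOf d).keys.filter
        (fun e => (d.getD a []).contains e && (d.getD b []).contains e)).Perm
      ((PySem.Set.ofList (d.getD a [])).filter (fun x => (d.getD b []).contains x)) := by
    rw [List.perm_ext_iff_of_nodup ((pvInv_nodup d).filter _)
      ((PySem.Set.nodup_ofList _).filter _)]
    intro e
    simp only [List.mem_filter, Bool.and_eq_true, List.contains_iff_mem, PySem.Set.mem_ofList]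
    constructor
    · rintro ⟨_, he1, he2⟩; exact ⟨he1, he2⟩
    · rintro ⟨he1, he2⟩; exact ⟨hEK e he1, he1, he2⟩
  rw [hL, pvFindnumCommon, PySem.Set.inter]
  exact congrArg (fun n : Nat => (n : Int)) hperm.length_eq

theorem pvAssemble (keys : List String) (hk : keys.Nodup)
    (v : String × String → Int) (w : String → Int) :
    ((keys.foldl (fun cm k => cm.insert (k, k) (w k))
        ((PySem.List.combinations keys 2).foldl
          (fun cm pr => cm.insert (pvUnpack2 pr) (v (pvUnpack2 pr))) PySem.Dict.empty)).items.map
      (fun p => (p.1.1, p.1.2, p.2)))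
    = (pvPairsOf keys).map (fun q => (q.1, q.2, v q)) ++ keys.map (fun k => (k, k, w k)) := by
  have h1 := PySem.Dict.items_foldl_insert_fresh (PySem.List.combinations keys 2) pvUnpack2
    (fun pr => v (pvUnpack2 pr)) PySem.Dict.empty (fun a _ => by simp) (pvNodup_pairsOf hk)
  have hkeys1 : ((PySem.List.combinations keys 2).foldl
      (fun cm pr => cm.insert (pvUnpack2 pr) (v (pvUnpack2 pr))) PySem.Dict.empty).keys
      = PySem.Set.ofList (pvPairsOf keys) := by
    rw [PySem.Dict.keys_foldl_insert_key]
    simp [PySem.Set.update, PySem.Set.ofList_eq_foldl, pvPairsOf]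
  have hfresh : ∀ k ∈ keys, ((PySem.List.combinations keys 2).foldl
      (fun cm pr => cm.insert (pvUnpack2 pr) (v (pvUnpack2 pr))) PySem.Dict.empty).contains (k, k)
        = false := by
    intro k _
    rw [PySem.Dict.contains_eq_decide_mem_keys, hkeys1]
    simp only [PySem.Set.mem_ofList]
    rw [decide_eq_false_iff_not]
    intro hm
    have := (pvMem_pairsOf_iff hk k k).1 hm
    rw [pvOB_irrefl hk k] at this
    exact Bool.false_ne_true this
  have hdiag : (keys.map (fun k => ((k : String), k))).Nodup :=
    hk.map (fun a b h => congrArg Prod.fst h)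
  have h2 := PySem.Dict.items_foldl_insert_fresh keys (fun k => ((k : String), k)) w
    ((PySem.List.combinations keys 2).foldl
      (fun cm pr => cm.insert (pvUnpack2 pr) (v (pvUnpack2 pr))) PySem.Dict.empty)
    hfresh hdiag
  rw [h2, h1]
  simp [List.map_map, pvPairsOf, Function.comp_def, PySem.Dict.empty]

theorem pvMain (final_dict : List (String × List String)) :
    create_count_matrix final_dict = create_count_matrix_alt final_dict := by
  have hk : (PySem.Dict.ofList final_dict).keys.Nodup := PySem.Dict.nodup_keys_ofList final_dict
  calc create_count_matrix final_dict
      = (pvPairsOf (PySem.Dict.ofList final_dict).keys).map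
          (fun q => (q.1, q.2, pvFindnumCommon ((PySem.Dict.ofList final_dict).getD q.1 [])
            ((PySem.Dict.ofList final_dict).getD q.2 [])))
        ++ (PySem.Dict.ofList final_dict).keys.map
            (fun k => (k, k, (((PySem.Dict.ofList final_dict).getD k []).length : Int))) :=
        pvAssemble (PySem.Dict.ofList final_dict).keys hk
          (fun q => pvFindnumCommon ((PySem.Dict.ofList final_dict).getD q.1 [])
            ((PySem.Dict.ofList final_dict).getD q.2 []))
          (fun k => (((PySem.Dict.ofList final_dict).getD k []).length : Int))
    _ = (pvPairsOf (PySem.Dict.ofList final_dict).keys).map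
          (fun q => (q.1, q.2, (pvPcOf (pvInvOf (PySem.Dict.ofList final_dict))).getD q 0))
        ++ (PySem.Dict.ofList final_dict).keys.map
            (fun k => (k, k, (((PySem.Dict.ofList final_dict).getD k []).length : Int))) := by
        refine congrArg (· ++ _) ?_
        refine List.map_congr_left ?_
        intro q hq
        rw [pvValue_eq (PySem.Dict.ofList final_dict) hk q hq]
    _ = create_count_matrix_alt final_dict :=
        (pvAssemble (PySem.Dict.ofList final_dict).keys hk
          (fun q => (pvPcOf (pvInvOf (PySem.Dict.ofList final_dict))).getD q 0)
          (fun k => (((PySem.Dict.ofList final_dict).getD k []).length : Int))).symm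

-- ===== VERDICT (by name: the statement is the Claim_ definition above) =====
theorem create_count_matrix_spec : Claim_equal_create_count_matrix := by
  intro final_dict _
  unfold Spec_create_count_matrix
  exact pvMain final_dict
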